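-- pv_equiv track=rewrite | github.com/CodingThrust/problem-reductions | docs/paper/verify-reductions/adversary_three_dimensional_matching_three_partition.py | adv_step1
-- ===== SOURCE A (Python) =====
-- def adv_step1(q: int, triples: list[tuple[int, int, int]]):
--     """Independent ABCD-partition construction."""
--     t = len(triples)
--     base = 32 * q
--     b2 = base * base
--     b3 = b2 * base
--     b4 = b3 * base
--     target1 = 40 * b4
--
--     set_a = []
--     set_b = []
--     set_c = []
--     set_d = []
--
--     seen_w = {}
--     seen_x = {}
--     seen_y = {}
--
--     for idx, (wi, xj, yk) in enumerate(triples):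
--         # A-element (triplet encoding)
--         set_a.append(10 * b4 - yk * b3 - xj * b2 - wi * base)
--
--         # B-element (W-vertex)
--         if wi not in seen_w:
--             seen_w[wi] = idx
--             set_b.append(10 * b4 + wi * base)
--         else:
--             set_b.append(11 * b4 + wi * base)
--
--         # C-element (X-vertex)
--         if xj not in seen_x:
--             seen_x[xj] = idx
--             set_c.append(10 * b4 + xj * b2)
--         else:
--             set_c.append(11 * b4 + xj * b2)
--
--         # D-element (Y-vertex)
--         if yk not in seen_y:
--             seen_y[yk] = idx
--             set_d.append(10 * b4 + yk * b3)
--         else: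
--             set_d.append(8 * b4 + yk * b3)
--
--     return set_a, set_b, set_c, set_d, target1
-- ===== SOURCE B (Python) =====
-- def adv_step1(q: int, triples: list[tuple[int, int, int]]):
--     """Independent ABCD-partition construction (two-phase: first-occurrence flags, then per-set comprehensions)."""
--     base = 32 * q
--     b2 = base * base
--     b3 = b2 * base
--     b4 = b3 * base
--     target1 = 40 * b4
--
--     def first_flags(vals):
--         seen = set()
--         flags = []
--         for v in vals:
--             flags.append(v not in seen)
--             seen.add(v)
--         return flags
--
--     ws = [t[0] for t in triples]
--     xs = [t[1] for t in triples]
--     ys = [t[2] for t in triples]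
--
--     set_a = [10 * b4 - y * b3 - x * b2 - w * base for (w, x, y) in triples]
--     set_b = [(10 if f else 11) * b4 + w * base for w, f in zip(ws, first_flags(ws))]
--     set_c = [(10 if f else 11) * b4 + x * b2 for x, f in zip(xs, first_flags(xs))]
--     set_d = [(10 if f else 8) * b4 + y * b3 for y, f in zip(ys, first_flags(ys))]
--
--     return set_a, set_b, set_c, set_d, target1
-- ===== Notes on version B (the rewrite author's own statement) =====
-- stated objective: alternative
-- what changed: Replaces A's single interleaved loop with three dict accumulators by a two-phase decomposition: a reusable first-occurrence-flag pass per coordinate (set-based), then four independent comprehensions building set_a..set_d.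
import Mathlib
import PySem

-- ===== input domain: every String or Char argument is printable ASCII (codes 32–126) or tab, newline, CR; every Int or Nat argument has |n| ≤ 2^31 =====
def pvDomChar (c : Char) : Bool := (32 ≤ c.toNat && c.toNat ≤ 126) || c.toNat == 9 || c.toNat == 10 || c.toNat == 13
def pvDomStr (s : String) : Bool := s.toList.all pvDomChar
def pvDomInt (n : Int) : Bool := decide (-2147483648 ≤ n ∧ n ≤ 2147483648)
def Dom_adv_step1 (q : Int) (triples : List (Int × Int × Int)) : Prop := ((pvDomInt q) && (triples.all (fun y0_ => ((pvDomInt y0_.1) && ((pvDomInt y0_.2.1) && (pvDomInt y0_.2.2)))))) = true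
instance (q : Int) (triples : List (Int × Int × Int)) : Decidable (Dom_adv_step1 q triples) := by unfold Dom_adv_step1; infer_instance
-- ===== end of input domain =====

-- B restructures A's single interleaved loop into a first-occurrence-flag pass per coordinate plus
-- four independent comprehensions (objective: alternative decomposition, same cost).

-- ===== PORT A =====
-- A's single loop over enumerate(triples): state = three seen-dicts, four output lists (built by cons-recursion).
def advLoopA (base b2 b3 b4 : Int) :
    List (Int × Int × Int) → Int → PySem.Dict Int Int → PySem.Dict Int Int → PySem.Dict Int Int →
    List Int × List Int × List Int × List Int
  | [], _, _, _, _ => ([], [], [], [])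
  | (wi, xj, yk) :: rest, idx, seenW, seenX, seenY =>
    let a := 10 * b4 - yk * b3 - xj * b2 - wi * base
    let bv := if (PySem.Dict.contains seenW wi) = false then 10 * b4 + wi * base else 11 * b4 + wi * base
    let seenW' := if (PySem.Dict.contains seenW wi) = false then seenW.insert wi idx else seenW
    let cv := if (PySem.Dict.contains seenX xj) = false then 10 * b4 + xj * b2 else 11 * b4 + xj * b2
    let seenX' := if (PySem.Dict.contains seenX xj) = false then seenX.insert xj idx else seenX
    let dv := if (PySem.Dict.contains seenY yk) = false then 10 * b4 + yk * b3 else 8 * b4 + yk * b3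
    let seenY' := if (PySem.Dict.contains seenY yk) = false then seenY.insert yk idx else seenY
    let r := advLoopA base b2 b3 b4 rest (idx + 1) seenW' seenX' seenY'
    (a :: r.1, bv :: r.2.1, cv :: r.2.2.1, dv :: r.2.2.2)

def adv_step1 (q : Int) (triples : List (Int × Int × Int)) : List Int × List Int × List Int × List Int × Int :=
  let _t := triples.length
  let base := 32 * q
  let b2 := base * base
  let b3 := b2 * base
  let b4 := b3 * base
  let target1 := 40 * b4
  let r := advLoopA base b2 b3 b4 triples 0 PySem.Dict.empty PySem.Dict.empty PySem.Dict.empty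
  (r.1, r.2.1, r.2.2.1, r.2.2.2, target1)

-- ===== PORT B =====
-- first_flags: per value, whether it is the first occurrence so far (set accumulator)
def firstFlags : List Int → PySem.Set Int → List Bool
  | [], _ => []
  | v :: rest, seen => (!(PySem.Set.contains seen v)) :: firstFlags rest (PySem.Set.add seen v)

def adv_step1_alt (q : Int) (triples : List (Int × Int × Int)) : List Int × List Int × List Int × List Int × Int :=
  let base := 32 * q
  let b2 := base * base
  let b3 := b2 * base
  let b4 := b3 * base
  let target1 := 40 * b4
  let ws := triples.map (·.1)
  let xs := triples.map (·.2.1)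
  let ys := triples.map (·.2.2)
  let setA := triples.map (fun p => 10 * b4 - p.2.2 * b3 - p.2.1 * b2 - p.1 * base)
  let setB := (ws.zip (firstFlags ws PySem.Set.empty)).map (fun p => (if p.2 then 10 else 11) * b4 + p.1 * base)
  let setC := (xs.zip (firstFlags xs PySem.Set.empty)).map (fun p => (if p.2 then 10 else 11) * b4 + p.1 * b2)
  let setD := (ys.zip (firstFlags ys PySem.Set.empty)).map (fun p => (if p.2 then 10 else 8) * b4 + p.1 * b3)
  (setA, setB, setC, setD, target1)

-- ===== PRECONDITION & SPEC =====
def Spec_adv_step1 (q : Int) (triples : List (Int × Int × Int)) (out : List Int × List Int × List Int × List Int × Int) : Prop := out = adv_step1_alt q triples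
instance (q : Int) (triples : List (Int × Int × Int)) (out : List Int × List Int × List Int × List Int × Int) : Decidable (Spec_adv_step1 q triples out) := by unfold Spec_adv_step1; infer_instance

-- ===== CLAIM (what is proved, stated in full; the proofs are below) =====
def Claim_equal_adv_step1 : Prop := ∀ (q : Int) (triples : List (Int × Int × Int)), Dom_adv_step1 q triples → Spec_adv_step1 q triples (adv_step1 q triples)

-- ===== LEMMAS AND PROOFS =====

-- the seen-dict of A's loop and the seen-set of B's flag pass track the same membership
theorem contains_step (s : PySem.Dict Int Int) (e : PySem.Set Int) (w idx : Int)
    (h : ∀ v, s.contains v = decide (v ∈ e)) (v : Int) :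
    (if s.contains w = false then s.insert w idx else s).contains v
      = decide (v ∈ PySem.Set.add e w) := by
  rw [PySem.Set.add_eq_ite]
  by_cases hm : w ∈ e
  · simp [hm, h]
  · simp [hm, h, PySem.Dict.contains_insert]
    by_cases hv : v = w <;> simp [hv]

theorem advLoopA_eq (base b2 b3 b4 : Int) (ts : List (Int × Int × Int)) (idx : Int)
    (sw sx sy : PySem.Dict Int Int) (ew ex ey : PySem.Set Int)
    (hw : ∀ v, sw.contains v = decide (v ∈ ew))
    (hx : ∀ v, sx.contains v = decide (v ∈ ex))
    (hy : ∀ v, sy.contains v = decide (v ∈ ey)) :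
    advLoopA base b2 b3 b4 ts idx sw sx sy =
      (ts.map (fun p => 10 * b4 - p.2.2 * b3 - p.2.1 * b2 - p.1 * base),
       ((ts.map (·.1)).zip (firstFlags (ts.map (·.1)) ew)).map (fun p => (if p.2 then 10 else 11) * b4 + p.1 * base),
       ((ts.map (·.2.1)).zip (firstFlags (ts.map (·.2.1)) ex)).map (fun p => (if p.2 then 10 else 11) * b4 + p.1 * b2),
       ((ts.map (·.2.2)).zip (firstFlags (ts.map (·.2.2)) ey)).map (fun p => (if p.2 then 10 else 8) * b4 + p.1 * b3)) := by
  induction ts generalizing idx sw sx sy ew ex ey with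
  | nil => simp [advLoopA, firstFlags]
  | cons hd tl ih =>
    obtain ⟨wi, xj, yk⟩ := hd
    rw [advLoopA,
        ih (idx + 1) _ _ _ (PySem.Set.add ew wi) (PySem.Set.add ex xj) (PySem.Set.add ey yk)
          (contains_step sw ew wi idx hw) (contains_step sx ex xj idx hx) (contains_step sy ey yk idx hy)]
    simp only [List.map_cons, firstFlags, List.zip_cons_cons, hw, hx, hy,
      PySem.Set.contains_eq_listContains, List.contains_eq_mem]
    simp only [Prod.mk.injEq]
    refine ⟨trivial, ?_, ?_, ?_⟩
    · by_cases h : wi ∈ ew <;> simp [h]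
    · by_cases h : xj ∈ ex <;> simp [h]
    · by_cases h : yk ∈ ey <;> simp [h]
-- ===== VERDICT (by name: the statement is the Claim_ definition above) =====
theorem adv_step1_spec : Claim_equal_adv_step1 := by
  intro q triples _
  unfold Spec_adv_step1 adv_step1 adv_step1_alt
  simp only
  rw [advLoopA_eq _ _ _ _ _ _ _ _ _ PySem.Set.empty PySem.Set.empty PySem.Set.empty
    (by intro v; simp) (by intro v; simp) (by intro v; simp)]
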